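-- pv_equiv track=rewrite | github.com/nickjpearce/cs440 | p3/npearcePlayer.py | searchNeighborhood
-- ===== SOURCE A (Python) =====
-- def isLegalTriangle(a, b, c):
--     isOne = (a == 1 or b == 1 or c == 1)
--     isTwo = (a == 2 or b == 2 or c == 2)
--     isThree = (a == 3 or b == 3 or c == 3)
--     return not(isOne and isTwo and isThree)
--
-- def checkPosition(B, pos):
--     #convert tuple to individual coordinates
--     bdist = pos[0]
--     ldist = pos[1]
--     #list of tuples of coordinate adjustments to explore neighborhood of pos
--     hood = [(1,0),(0,1),(-1,1),(-1,0),(0,-1),(1,-1)]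
--     #for storing legal moves
--     moves = []
--     #test each color
--     for c in range(1, 4):
--         allLegal = True
--         #search through neighborhood two at a time
--         for i in range(6):
--             adjust1 = hood[i]
--             adjust2 = hood[(i+1)%6]
--             color1 = B[bdist + adjust1[0]][ldist + adjust1[1]]
--             color2 = B[bdist + adjust2[0]][ldist + adjust2[1]]
--             #skip unnecessary computations
--             if(color1 != 0 and color2 != 0 and color1 != color2):
--                 l = isLegalTriangle(c, color1, color2)
--                 if not l:
--                     allLegal = False
--                     break
--         if allLegal:
--             moves.append(c)
--     return moves
--
-- def searchNeighborhood(B, lp):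
--     #enumerate tuple elements
--     bdist = lp[1]
--     ldist = lp[2]
--     #list of tuples of coordinate adjustments to explore neighborhood of lp
--     hood = [(1,0),(0,1),(-1,1),(-1,0),(0,-1),(1,-1)]
--     #fill list with tuples of uncolored positions in neighborhood
--     uncolored = []
--     for adjust in hood:
--         badjust = bdist + adjust[0]
--         ladjust = ldist + adjust[1]
--         if(B[badjust][ladjust] == 0):
--             uncolored.append((badjust, ladjust))
--     #return empty list if no uncolored positions in neighborhood
--     if not uncolored:
--         return uncolored
--     #otherwise find legal colors at each uncolored position
--     else:
--         moves = []
--         for pos in uncolored: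
--             colors = checkPosition(B, pos)
--             for c in colors:
--                 moves.append((c,) + pos)
--         #store losing move with signifier if player has lost
--         if not moves:
--             moves.append((-1, -1, -1))
--             moves.append((1,) + uncolored[0])
--         return moves
-- ===== SOURCE B (Python) =====
-- HOOD = [(1, 0), (0, 1), (-1, 1), (-1, 0), (0, -1), (1, -1)]
--
--
-- def checkPosition(B, pos):
--     b, l = pos[0], pos[1]
--     ring = [B[b + db][l + dl] for (db, dl) in HOOD]
--     pairs = list(zip(ring, ring[1:] + ring[:1]))
--     forbidden = {6 - c1 - c2 for (c1, c2) in pairs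
--                  if c1 != c2 and c1 in (1, 2, 3) and c2 in (1, 2, 3)}
--     return [c for c in (1, 2, 3) if c not in forbidden]
--
--
-- def searchNeighborhood(B, lp):
--     b, l = lp[1], lp[2]
--     nbrs = [(b + db, l + dl) for (db, dl) in HOOD]
--     vals = [B[pb][pl] for (pb, pl) in nbrs]
--     uncolored = [p for (p, v) in zip(nbrs, vals) if v == 0]
--     if not uncolored:
--         return []
--     moves = [(c,) + p for p in uncolored for c in checkPosition(B, p)]
--     if not moves:
--         return [(-1, -1, -1), (1,) + uncolored[0]]
--     return moves
-- ===== Notes on version B (the rewrite author's own statement) =====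
-- stated objective: simpler
-- what changed: checkPosition's 3-colors x 6-pairs test-with-early-break is replaced by one pass over the 6 consecutive neighbor pairs building a forbidden-color set (a pair of distinct colors in {1,2,3} forbids the third color 6-c1-c2), then filtering (1,2,3); the outer routine is rebuilt from comprehensions over the precomputed neighbor ring.
import Mathlib
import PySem

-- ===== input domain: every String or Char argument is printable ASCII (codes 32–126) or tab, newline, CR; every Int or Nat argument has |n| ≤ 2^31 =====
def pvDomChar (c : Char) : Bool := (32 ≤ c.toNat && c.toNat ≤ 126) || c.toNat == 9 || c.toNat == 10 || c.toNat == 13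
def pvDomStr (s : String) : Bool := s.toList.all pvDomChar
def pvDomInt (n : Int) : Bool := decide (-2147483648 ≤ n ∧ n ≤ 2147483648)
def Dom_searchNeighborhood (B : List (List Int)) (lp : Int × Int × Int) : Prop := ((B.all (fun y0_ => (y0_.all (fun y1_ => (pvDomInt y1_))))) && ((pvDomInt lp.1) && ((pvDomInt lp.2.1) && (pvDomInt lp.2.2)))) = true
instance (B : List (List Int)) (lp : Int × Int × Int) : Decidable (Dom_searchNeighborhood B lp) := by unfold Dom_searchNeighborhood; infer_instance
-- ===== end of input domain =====

-- B replaces A's 3-colors × 6-pairs legality test (with early break) in checkPosition by a single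
-- pass over the 6 consecutive neighbor pairs building a forbidden-color set, then filters (1,2,3);
-- the outer routine is rebuilt from comprehensions over a precomputed neighbor ring. Objective: simpler.

-- ===== PORT A =====
-- shared constant: the hex-neighborhood offsets
def hoodP : List (Int × Int) := [(1,0),(0,1),(-1,1),(-1,0),(0,-1),(1,-1)]

-- B[b][l] with Python indexing (negative from the end); none = IndexError
def cellAt? (B : List (List Int)) (b l : Int) : Option Int :=
  (PySem.List.pyGet? B b).bind (fun row => PySem.List.pyGet? row l)

def isLegalTriangle (a b c : Int) : Bool :=
  !((a == 1 || b == 1 || c == 1) && (a == 2 || b == 2 || c == 2) && (a == 3 || b == 3 || c == 3))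

-- A's inner 'for i in range(6)' with early break; none = IndexError inside the loop
def checkLoop (B : List (List Int)) (bd ld c : Int) : List Int → Option Bool
  | [] => some true
  | i :: rest =>
    let a1 := hoodP.getD i.toNat ((0:Int), (0:Int))
    let a2 := hoodP.getD (PySem.Int.mod (i+1) 6).toNat ((0:Int), (0:Int))
    match cellAt? B (bd + a1.1) (ld + a1.2), cellAt? B (bd + a2.1) (ld + a2.2) with
    | some c1, some c2 =>
      if c1 != 0 && c2 != 0 && c1 != c2 then
        if !isLegalTriangle c c1 c2 then some false else checkLoop B bd ld c rest
      else checkLoop B bd ld c rest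
    | _, _ => none

-- A's 'for c in range(1,4)' accumulating legal colors
def cpColors (B : List (List Int)) (bd ld : Int) : List Int → Option (List Int)
  | [] => some []
  | c :: cs =>
    match checkLoop B bd ld c (PySem.List.pyRange 0 6 1) with
    | some allLegal => (cpColors B bd ld cs).map (fun rest => if allLegal then c :: rest else rest)
    | none => none

def checkPositionA (B : List (List Int)) (pos : Int × Int) : Option (List Int) :=
  cpColors B pos.1 pos.2 (PySem.List.pyRange 1 4 1)

-- A's 'for adjust in hood: … if B[badjust][ladjust]==0: uncolored.append(…)'
def collectUncolored (B : List (List Int)) (bd ld : Int) : List (Int × Int) → Option (List (Int × Int))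
  | [] => some []
  | a :: rest =>
    match cellAt? B (bd + a.1) (ld + a.2) with
    | some v => (collectUncolored B bd ld rest).map
        (fun r => if v == 0 then (bd + a.1, ld + a.2) :: r else r)
    | none => none

-- A's 'for pos in uncolored: … for c in colors: moves.append((c,)+pos)'
def buildMoves (B : List (List Int)) : List (Int × Int) → Option (List (Int × Int × Int))
  | [] => some []
  | p :: ps =>
    match checkPositionA B p with
    | some cs => (buildMoves B ps).map (fun r => cs.map (fun c => (c, p.1, p.2)) ++ r)
    | none => none

def searchNeighborhood (B : List (List Int)) (lp : Int × Int × Int) : List (Int × Int × Int) :=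
  match collectUncolored B lp.2.1 lp.2.2 hoodP with
  | none => []   -- IndexError (outside Pre_)
  | some unc =>
    match unc with
    | [] => []
    | u0 :: _ =>
      match buildMoves B unc with
      | none => []   -- IndexError (outside Pre_)
      | some moves => if moves.isEmpty then [(-1,-1,-1), (1, u0.1, u0.2)] else moves

-- ===== PORT B =====
-- comprehension '[B[pb][pl] for (pb,pl) in ps]'; none = IndexError
def ringVals (B : List (List Int)) : List (Int × Int) → Option (List Int)
  | [] => some []
  | p :: ps =>
    match cellAt? B p.1 p.2 with
    | some v => (ringVals B ps).map (fun r => v :: r)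
    | none => none

def forbCond (p : Int × Int) : Bool :=
  p.1 != p.2 && (p.1 == 1 || p.1 == 2 || p.1 == 3) && (p.2 == 1 || p.2 == 2 || p.2 == 3)

def checkPositionB (B : List (List Int)) (pos : Int × Int) : Option (List Int) :=
  (ringVals B (hoodP.map (fun a => (pos.1 + a.1, pos.2 + a.2)))).map (fun ring =>
    -- pairs = zip(ring, ring[1:] + ring[:1]); drop/take are exact for these nonneg in-range slices
    let pairs := ring.zip (ring.drop 1 ++ ring.take 1)
    let forbidden : PySem.Set Int :=
      PySem.Set.ofList ((pairs.filter forbCond).map (fun p => 6 - p.1 - p.2))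
    ([1,2,3] : List Int).filter (fun c => !(PySem.Set.contains forbidden c)))

-- comprehension '[(c,)+p for p in uncolored for c in checkPosition(B,p)]'
def movesOf (B : List (List Int)) : List (Int × Int) → Option (List (Int × Int × Int))
  | [] => some []
  | p :: ps =>
    match checkPositionB B p with
    | some cs => (movesOf B ps).map (fun r => cs.map (fun c => (c, p.1, p.2)) ++ r)
    | none => none

def searchNeighborhood_alt (B : List (List Int)) (lp : Int × Int × Int) : List (Int × Int × Int) :=
  let nbrs := hoodP.map (fun a => (lp.2.1 + a.1, lp.2.2 + a.2))
  match ringVals B nbrs with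
  | none => []   -- IndexError (outside Pre_)
  | some vals =>
    match ((nbrs.zip vals).filter (fun pv => pv.2 == 0)).map Prod.fst with
    | [] => []
    | u0 :: us =>
      match movesOf B (u0 :: us) with
      | none => []   -- IndexError (outside Pre_)
      | some ms => if ms.isEmpty then [(-1,-1,-1), (1, u0.1, u0.2)] else ms

-- ===== PRECONDITION & SPEC =====
-- proof-/precondition-side board access (independent of the ports)
def pvCellOk (B : List (List Int)) (b l : Int) : Prop :=
  PySem.Raise.InRange B.length b ∧ PySem.Raise.InRange (PySem.List.pyGetD B b []).length l

def pvCellD (B : List (List Int)) (b l : Int) : Int :=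
  PySem.List.pyGetD (PySem.List.pyGetD B b []) l 0

-- Pre_ excludes inputs where some cell of the two-step neighborhood (the 6 neighbors of lp, and the
-- 6 neighbors of each uncolored neighbor) is out of range: there B's full pass raises IndexError,
-- while A either raises as well or (when its early breaks happen to skip the out-of-range cell)
-- returns a value B cannot.
def Pre_searchNeighborhood (B : List (List Int)) (lp : Int × Int × Int) : Prop :=
  ∀ a ∈ ([(1,0),(0,1),(-1,1),(-1,0),(0,-1),(1,-1)] : List (Int × Int)),
    pvCellOk B (lp.2.1 + a.1) (lp.2.2 + a.2) ∧
    (pvCellD B (lp.2.1 + a.1) (lp.2.2 + a.2) = 0 →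
      ∀ a2 ∈ ([(1,0),(0,1),(-1,1),(-1,0),(0,-1),(1,-1)] : List (Int × Int)),
        pvCellOk B (lp.2.1 + a.1 + a2.1) (lp.2.2 + a.2 + a2.2))

instance (B : List (List Int)) (lp : Int × Int × Int) : Decidable (Pre_searchNeighborhood B lp) := by
  unfold Pre_searchNeighborhood pvCellOk PySem.Raise.InRange; infer_instance

def pvWitness_searchNeighborhood : List (List Int) × (Int × Int × Int) :=
  ([[0,0,0,0,0],[0,0,0,0,0],[0,0,0,0,0],[0,0,0,0,0],[0,0,0,0,0]], (0, 2, 2))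

def Spec_searchNeighborhood (B : List (List Int)) (lp : Int × Int × Int) (out : List (Int × Int × Int)) : Prop := out = searchNeighborhood_alt B lp
instance (B : List (List Int)) (lp : Int × Int × Int) (out : List (Int × Int × Int)) : Decidable (Spec_searchNeighborhood B lp out) := by unfold Spec_searchNeighborhood; infer_instance

-- ===== CLAIM (what is proved, stated in full; the proofs are below) =====
def Claim_equal_searchNeighborhood : Prop := ∀ (B : List (List Int)) (lp : Int × Int × Int), Dom_searchNeighborhood B lp → Pre_searchNeighborhood B lp → Spec_searchNeighborhood B lp (searchNeighborhood B lp)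

-- ===== LEMMAS AND PROOFS =====

theorem pv_witness_ok :
    Dom_searchNeighborhood pvWitness_searchNeighborhood.1 pvWitness_searchNeighborhood.2 ∧
    Pre_searchNeighborhood pvWitness_searchNeighborhood.1 pvWitness_searchNeighborhood.2 := by
  decide

-- a cell that is in range is read as its pvCellD value
theorem cellAt?_of_ok (B : List (List Int)) (b l : Int) (h : pvCellOk B b l) :
    cellAt? B b l = some (pvCellD B b l) := by
  obtain ⟨h1, h2⟩ := h
  cases hr : PySem.List.pyGet? B b with
  | none => exact absurd h1 ((PySem.List.pyGet?_eq_none_iff B b).mp hr)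
  | some row =>
    have hrow : PySem.List.pyGetD B b [] = row := by
      simp [PySem.List.pyGetD, hr]
    rw [hrow] at h2
    cases hc : PySem.List.pyGet? row l with
    | none => exact absurd h2 ((PySem.List.pyGet?_eq_none_iff row l).mp hc)
    | some v =>
      have hv : PySem.List.pyGetD row l 0 = v := by simp [PySem.List.pyGetD, hc]
      simp [cellAt?, pvCellD, hr, hc, hrow, hv]

-- the combined per-pair condition of A's inner loop
def badB (c : Int) (p : Int × Int) : Bool :=
  (p.1 != 0 && p.2 != 0 && p.1 != p.2) && !(isLegalTriangle c p.1 p.2)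

theorem stepIf (c c1 c2 : Int) (X : Option Bool) :
    (if c1 != 0 && c2 != 0 && c1 != c2 then
       if !isLegalTriangle c c1 c2 then some false else X
     else X) = (if badB c (c1, c2) then some false else X) := by
  cases h1 : (c1 != 0 && c2 != 0 && c1 != c2) <;>
    cases h2 : isLegalTriangle c c1 c2 <;> simp [badB, h1, h2]

-- for a color c ∈ {1,2,3}, a pair is "bad" exactly when it forbids c via 6-c1-c2
theorem badB_iff (c : Int) (hc : c = 1 ∨ c = 2 ∨ c = 3) (p : Int × Int) :
    badB c p = true ↔ (forbCond p = true ∧ 6 - p.1 - p.2 = c) := by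
  obtain ⟨c1, c2⟩ := p
  rcases hc with hc | hc | hc <;> subst hc <;>
    simp [badB, forbCond, isLegalTriangle] <;> omega

-- A's per-color loop over a pair list equals "no pair forbids c" on B's forbidden set
theorem color_eq (c : Int) (hc : c = 1 ∨ c = 2 ∨ c = 3) (P : List (Int × Int)) :
    P.all (fun p => !badB c p) =
      !(PySem.Set.contains
          (PySem.Set.ofList ((P.filter forbCond).map (fun p => 6 - p.1 - p.2))) c) := by
  rw [Bool.eq_iff_iff]
  simp only [List.all_eq_true, Bool.not_eq_eq_eq_not, Bool.not_true,
    PySem.Set.contains_eq_listContains, List.contains_eq_mem, decide_eq_false_iff_not,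
    PySem.Set.mem_ofList, List.mem_map, List.mem_filter]
  constructor
  · rintro h ⟨p, ⟨hp, hfp⟩, he⟩
    exact absurd ((badB_iff c hc p).mpr ⟨hfp, he⟩) (by simp [h p hp])
  · intro h p hp
    cases hb : badB c p with
    | false => rfl
    | true =>
      obtain ⟨hf, he⟩ := (badB_iff c hc p).mp hb
      exact absurd ⟨p, ⟨hp, hf⟩, he⟩ h

-- one step of A's inner loop, when both cells of the pair are in range
theorem checkLoop_cons (B : List (List Int)) (bd ld c i : Int) (rest : List Int)
    (a1 a2 : Int × Int) (c1 c2 : Int)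
    (e1 : hoodP.getD i.toNat ((0:Int),(0:Int)) = a1)
    (e2 : hoodP.getD (PySem.Int.mod (i+1) 6).toNat ((0:Int),(0:Int)) = a2)
    (g1 : cellAt? B (bd + a1.1) (ld + a1.2) = some c1)
    (g2 : cellAt? B (bd + a2.1) (ld + a2.2) = some c2) :
    checkLoop B bd ld c (i :: rest)
      = if badB c (c1, c2) then some false else checkLoop B bd ld c rest := by
  simp only [checkLoop, e1, e2, g1, g2, stepIf]

-- checkLoop over the whole index range, when every ring cell is in range
theorem checkLoop_eq (B : List (List Int)) (bd ld c v0 v1 v2 v3 v4 v5 : Int)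
    (h0 : cellAt? B (bd + 1) (ld + 0) = some v0)
    (h1 : cellAt? B (bd + 0) (ld + 1) = some v1)
    (h2 : cellAt? B (bd + -1) (ld + 1) = some v2)
    (h3 : cellAt? B (bd + -1) (ld + 0) = some v3)
    (h4 : cellAt? B (bd + 0) (ld + -1) = some v4)
    (h5 : cellAt? B (bd + 1) (ld + -1) = some v5) :
    checkLoop B bd ld c (PySem.List.pyRange 0 6 1) =
      some (([(v0,v1),(v1,v2),(v2,v3),(v3,v4),(v4,v5),(v5,v0)] : List (Int × Int)).all
              (fun p => !badB c p)) := by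
  have hr : PySem.List.pyRange 0 6 1 = [0,1,2,3,4,5] := by decide
  rw [hr,
    checkLoop_cons B bd ld c 0 _ (1,0) (0,1) v0 v1 (by decide) (by decide) h0 h1,
    checkLoop_cons B bd ld c 1 _ (0,1) (-1,1) v1 v2 (by decide) (by decide) h1 h2,
    checkLoop_cons B bd ld c 2 _ (-1,1) (-1,0) v2 v3 (by decide) (by decide) h2 h3,
    checkLoop_cons B bd ld c 3 _ (-1,0) (0,-1) v3 v4 (by decide) (by decide) h3 h4,
    checkLoop_cons B bd ld c 4 _ (0,-1) (1,-1) v4 v5 (by decide) (by decide) h4 h5,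
    checkLoop_cons B bd ld c 5 _ (1,-1) (1,0) v5 v0 (by decide) (by decide) h5 h0]
  cases hb0 : badB c (v0, v1) <;> cases hb1 : badB c (v1, v2) <;>
    cases hb2 : badB c (v2, v3) <;> cases hb3 : badB c (v3, v4) <;>
    cases hb4 : badB c (v4, v5) <;> cases hb5 : badB c (v5, v0) <;>
    simp [checkLoop, hb0, hb1, hb2, hb3, hb4, hb5]

-- ring of values around a position, when every cell is in range
theorem ringVals_eq (B : List (List Int)) (ps : List (Int × Int))
    (h : ∀ p ∈ ps, pvCellOk B p.1 p.2) :
    ringVals B ps = some (ps.map (fun p => pvCellD B p.1 p.2)) := by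
  induction ps with
  | nil => rfl
  | cons p ps ih =>
    have hp := cellAt?_of_ok B p.1 p.2 (h p (by simp))
    simp [ringVals, hp, ih (fun q hq => h q (by simp [hq]))]

-- the two checkPositions agree at a position whose whole ring is in range
theorem checkPosition_eq (B : List (List Int)) (p : Int × Int)
    (h : ∀ a ∈ hoodP, pvCellOk B (p.1 + a.1) (p.2 + a.2)) :
    checkPositionA B p = checkPositionB B p := by
  have hm : ∀ a ∈ hoodP, cellAt? B (p.1 + a.1) (p.2 + a.2)
      = some (pvCellD B (p.1 + a.1) (p.2 + a.2)) :=
    fun a ha => cellAt?_of_ok _ _ _ (h a ha)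
  have h0 := hm (1,0) (by simp [hoodP])
  have h1 := hm (0,1) (by simp [hoodP])
  have h2 := hm (-1,1) (by simp [hoodP])
  have h3 := hm (-1,0) (by simp [hoodP])
  have h4 := hm (0,-1) (by simp [hoodP])
  have h5 := hm (1,-1) (by simp [hoodP])
  have hring : ringVals B (hoodP.map (fun a => (p.1 + a.1, p.2 + a.2)))
      = some (hoodP.map (fun a => pvCellD B (p.1 + a.1) (p.2 + a.2))) := by
    rw [ringVals_eq]
    · simp
    · intro q hq
      simp only [List.mem_map] at hq
      obtain ⟨a, ha, rfl⟩ := hq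
      exact h a ha
  have hrange : PySem.List.pyRange 1 4 1 = [1,2,3] := by decide
  unfold checkPositionA checkPositionB
  rw [hrange, hring]
  simp only [hoodP, List.map_cons, List.map_nil]
  rw [cpColors, cpColors, cpColors, cpColors,
    checkLoop_eq B p.1 p.2 1 _ _ _ _ _ _ h0 h1 h2 h3 h4 h5,
    checkLoop_eq B p.1 p.2 2 _ _ _ _ _ _ h0 h1 h2 h3 h4 h5,
    checkLoop_eq B p.1 p.2 3 _ _ _ _ _ _ h0 h1 h2 h3 h4 h5]
  simp only [Option.map_some]
  rw [color_eq 1 (by omega), color_eq 2 (by omega), color_eq 3 (by omega)]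
  simp only [List.zip_cons_cons, List.zip_nil_right, List.drop_succ_cons, List.drop_zero,
    List.take_succ_cons, List.take_zero, List.cons_append, List.nil_append,
    List.filter_cons, List.filter_nil]

-- A's uncolored loop, when every neighbor is in range
theorem collectUncolored_eq (B : List (List Int)) (bd ld : Int) (L : List (Int × Int))
    (h : ∀ a ∈ L, pvCellOk B (bd + a.1) (ld + a.2)) :
    collectUncolored B bd ld L =
      some ((L.filter (fun a => pvCellD B (bd + a.1) (ld + a.2) == 0)).map
              (fun a => (bd + a.1, ld + a.2))) := by
  induction L with
  | nil => rfl
  | cons a L ih =>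
    have ha := cellAt?_of_ok B (bd + a.1) (ld + a.2) (h a (by simp))
    have ih' := ih (fun q hq => h q (by simp [hq]))
    rw [collectUncolored, ha, ih', List.filter_cons]
    by_cases hz : pvCellD B (bd + a.1) (ld + a.2) = 0 <;> simp [hz]

-- the move builders agree when the per-position check functions agree
theorem moves_eq (B : List (List Int)) (u : List (Int × Int))
    (h : ∀ p ∈ u, checkPositionA B p = checkPositionB B p) :
    buildMoves B u = movesOf B u := by
  induction u with
  | nil => rfl
  | cons p ps ih =>
    rw [buildMoves, movesOf, ← h p (by simp), ih (fun q hq => h q (by simp [hq]))]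

-- B's uncolored comprehension produces the same list as A's loop
theorem unc_eq (B : List (List Int)) (bd ld : Int) (L : List (Int × Int)) :
    ((((L.map (fun a => (bd + a.1, ld + a.2))).zip
        (L.map (fun a => pvCellD B (bd + a.1) (ld + a.2)))).filter
          (fun pv => pv.2 == 0)).map Prod.fst) =
      ((L.filter (fun a => pvCellD B (bd + a.1) (ld + a.2) == 0)).map
        (fun a => (bd + a.1, ld + a.2))) := by
  induction L with
  | nil => rfl
  | cons a L ih =>
    simp only [List.map_cons, List.zip_cons_cons, List.filter_cons]
    by_cases hz : pvCellD B (bd + a.1) (ld + a.2) = 0 <;> simp [hz, ih]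

-- ===== VERDICT (by name: the statement is the Claim_ definition above) =====
theorem searchNeighborhood_spec : Claim_equal_searchNeighborhood := by
  intro B lp _hDom hPre
  unfold Spec_searchNeighborhood
  have hPre' : ∀ a ∈ hoodP,
      pvCellOk B (lp.2.1 + a.1) (lp.2.2 + a.2) ∧
      (pvCellD B (lp.2.1 + a.1) (lp.2.2 + a.2) = 0 →
        ∀ a2 ∈ hoodP, pvCellOk B (lp.2.1 + a.1 + a2.1) (lp.2.2 + a.2 + a2.2)) := hPre
  have h1 : ∀ a ∈ hoodP, pvCellOk B (lp.2.1 + a.1) (lp.2.2 + a.2) :=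
    fun a ha => (hPre' a ha).1
  have hc := collectUncolored_eq B lp.2.1 lp.2.2 hoodP h1
  have hring := ringVals_eq B (hoodP.map (fun a => (lp.2.1 + a.1, lp.2.2 + a.2)))
    (by intro q hq
        simp only [List.mem_map] at hq
        obtain ⟨a, ha, rfl⟩ := hq
        exact h1 a ha)
  -- all positions in the uncolored list have their full ring in range
  have hcp : ∀ p ∈ ((hoodP.filter
        (fun a => pvCellD B (lp.2.1 + a.1) (lp.2.2 + a.2) == 0)).map
          (fun a => (lp.2.1 + a.1, lp.2.2 + a.2))),
      checkPositionA B p = checkPositionB B p := by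
    intro p hp
    simp only [List.mem_map, List.mem_filter, beq_iff_eq] at hp
    obtain ⟨a, ⟨ha, hz⟩, rfl⟩ := hp
    apply checkPosition_eq
    intro a2 ha2
    have := (hPre' a ha).2 hz a2 ha2
    simpa [add_assoc] using this
  simp only [searchNeighborhood, searchNeighborhood_alt]
  rw [hc, hring]
  simp only [List.map_map, Function.comp_def]
  rw [unc_eq]
  cases he : (hoodP.filter
      (fun a => pvCellD B (lp.2.1 + a.1) (lp.2.2 + a.2) == 0)).map
        (fun a => (lp.2.1 + a.1, lp.2.2 + a.2)) with
  | nil => rfl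
  | cons u0 us =>
    rw [he] at hcp
    simp only [moves_eq B (u0 :: us) hcp]
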